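-- pv_equiv track=rewrite | github.com/Ja-B-Xu/AI | Lab 10-Crosswords (Semester 2)/CrosswordsTest.py | getIntersects
-- ===== SOURCE A (Python) =====
-- def getIntersects(posswords):
--     inters = {}
--     for w in posswords:
--         w1 = set(w)
--         w2 = tuple(w)
--         inter = set()
--         for x in posswords:
--             x1 = set(x)
--             x2 = tuple(x)
--             temp = w1.intersection(x1)
--             if len(temp) == 1:
--                 inter.add(x2)
--         inters[w2] = inter
--     return inters
-- ===== SOURCE B (Python) =====
-- def getIntersects(posswords):
--     # Inverted index: letter -> set of word-tuples containing it; then per word,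
--     # accumulate posting-list counts so count[xt] == |set(w) & set(x)|.
--     index = {}
--     words = []
--     for w in posswords:
--         t = tuple(w)
--         s = set(w)
--         words.append((t, s))
--         for c in s:
--             index.setdefault(c, set()).add(t)
--     inters = {}
--     for t, s in words:
--         counts = {}
--         for c in s:
--             for xt in index[c]:
--                 counts[xt] = counts.get(xt, 0) + 1
--         inter = set()
--         for xt, _ in words:
--             if counts.get(xt, 0) == 1:
--                 inter.add(xt)
--         inters[t] = inter
--     return inters
-- ===== Notes on version B (the rewrite author's own statement) =====
-- stated objective: alternative
-- what changed: Replaces the nested pairwise set-intersection scan by an inverted index letter->word-tuples built in one pass, from which per-word shared-letter counts are accumulated via posting lists; a word-tuple with final count exactly 1 shares exactly one letter.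
import Mathlib
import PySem

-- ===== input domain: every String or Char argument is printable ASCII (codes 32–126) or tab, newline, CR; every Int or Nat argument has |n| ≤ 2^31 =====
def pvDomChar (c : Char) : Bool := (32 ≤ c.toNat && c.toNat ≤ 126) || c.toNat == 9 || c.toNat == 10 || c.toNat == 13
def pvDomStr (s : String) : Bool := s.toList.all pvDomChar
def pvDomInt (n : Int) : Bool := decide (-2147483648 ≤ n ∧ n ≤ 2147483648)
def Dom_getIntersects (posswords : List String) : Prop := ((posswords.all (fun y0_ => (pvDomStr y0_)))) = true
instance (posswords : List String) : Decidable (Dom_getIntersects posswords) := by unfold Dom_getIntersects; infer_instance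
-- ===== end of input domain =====

-- B replaces A's pairwise set intersections by an inverted index (letter -> word-tuples)
-- with posting-list count accumulation; equivalence of the returned dict is proved below.

-- ===== PORT A =====
-- tuple(w) for a Python str: the tuple of its 1-character strings (shared helper, both Pythons compute it)
def pyTuple (w : String) : List String := w.toList.map (fun c => String.ofList [c])

def getIntersects (posswords : List String) : List (List String × List (List String)) :=
  let inters := posswords.foldl (fun inters w =>
    let w1 : PySem.Set String := PySem.Set.ofList (pyTuple w)      -- set(w)
    let w2 : List String := pyTuple w                              -- tuple(w)
    let inter := posswords.foldl (fun inter x =>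
      let x1 : PySem.Set String := PySem.Set.ofList (pyTuple x)
      let x2 : List String := pyTuple x
      let temp := PySem.Set.inter w1 x1
      if PySem.Set.len temp = 1 then PySem.Set.add inter x2 else inter)
      (PySem.Set.empty : PySem.Set (List String))
    inters.insert w2 inter)
    (PySem.Dict.empty : PySem.Dict (List String) (PySem.Set (List String)))
  inters.items

-- ===== PORT B =====
def getIntersects_alt (posswords : List String) : List (List String × List (List String)) :=
  let p := posswords.foldl (fun p w =>
      let t := pyTuple w
      let s : PySem.Set String := PySem.Set.ofList t
      let index := s.foldl (fun idx c =>
          idx.insert c (PySem.Set.add (idx.getD c PySem.Set.empty) t)) p.1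
      (index, p.2 ++ [(t, s)]))
    ((PySem.Dict.empty : PySem.Dict String (PySem.Set (List String))),
     ([] : List (List String × PySem.Set String)))
  let index := p.1
  let words := p.2
  let inters := words.foldl (fun inters ts =>
      let counts := ts.2.foldl (fun cnts c =>
          (index.getD c PySem.Set.empty).foldl
            (fun cnts xt => cnts.insert xt (cnts.getD xt 0 + 1)) cnts)
        (PySem.Dict.empty : PySem.Dict (List String) Int)
      let inter := words.foldl (fun inter xs =>
          if counts.getD xs.1 0 = (1:Int) then PySem.Set.add inter xs.1 else inter)
        (PySem.Set.empty : PySem.Set (List String))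
      inters.insert ts.1 inter)
    (PySem.Dict.empty : PySem.Dict (List String) (PySem.Set (List String)))
  inters.items

-- ===== PRECONDITION & SPEC =====
def Spec_getIntersects (posswords : List String) (out : List (List String × List (List String))) : Prop := out = getIntersects_alt posswords
instance (posswords : List String) (out : List (List String × List (List String))) : Decidable (Spec_getIntersects posswords out) := by unfold Spec_getIntersects; infer_instance

-- ===== CLAIM (what is proved, stated in full; the proofs are below) =====
def Claim_equal_getIntersects : Prop := ∀ (posswords : List String), Dom_getIntersects posswords → Spec_getIntersects posswords (getIntersects posswords)

-- ===== LEMMAS AND PROOFS =====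

def pvWordPair (w : String) : List String × PySem.Set String :=
  (pyTuple w, PySem.Set.ofList (pyTuple w))

-- the inner index-update loop of B's first pass, as a named function
def pvIdxIns (t : List String) (d : PySem.Dict String (PySem.Set (List String)))
    (cs : List String) : PySem.Dict String (PySem.Set (List String)) :=
  cs.foldl (fun idx c => idx.insert c (PySem.Set.add (idx.getD c PySem.Set.empty) t)) d

-- the whole first pass index
def pvIdx (ws : List String) (d : PySem.Dict String (PySem.Set (List String))) :
    PySem.Dict String (PySem.Set (List String)) :=
  ws.foldl (fun d w => pvIdxIns (pyTuple w) d (PySem.Set.ofList (pyTuple w))) d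

lemma pvTuple_inj {w x : String} (h : pyTuple w = pyTuple x) : w = x := by
  have hinj : Function.Injective (fun c => String.ofList [c]) := by
    intro a b hab
    have h3 := congrArg String.toList hab
    simpa [String.toList_ofList] using h3
  have h2 : w.toList = x.toList := List.map_injective_iff.mpr hinj h
  exact String.toList_inj.mp h2


lemma pvPass1 (ws : List String) (d : PySem.Dict String (PySem.Set (List String)))
    (acc : List (List String × PySem.Set String)) :
    ws.foldl (fun p w =>
      let t := pyTuple w
      let s : PySem.Set String := PySem.Set.ofList t
      let index := s.foldl (fun idx c =>
          idx.insert c (PySem.Set.add (idx.getD c PySem.Set.empty) t)) p.1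
      (index, p.2 ++ [(t, s)])) (d, acc)
    = (pvIdx ws d, acc ++ ws.map pvWordPair) := by
  induction ws generalizing d acc with
  | nil => simp [pvIdx]
  | cons w ws ih =>
    simp only [List.foldl_cons, List.map_cons]
    rw [ih]
    simp [pvIdx, pvIdxIns, pvWordPair, List.foldl_cons]


lemma pvIdxIns_mem (cs : List String) (t : List String)
    (d : PySem.Dict String (PySem.Set (List String))) (c' : String) (xt : List String) :
    xt ∈ (pvIdxIns t d cs).getD c' PySem.Set.empty ↔
      xt ∈ d.getD c' PySem.Set.empty ∨ (c' ∈ cs ∧ xt = t) := by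
  induction cs generalizing d with
  | nil => simp [pvIdxIns]
  | cons c cs ih =>
    simp only [pvIdxIns, List.foldl_cons] at *
    rw [ih]
    by_cases hc : c' = c
    · subst hc
      simp [PySem.Set.mem_add]
      tauto
    · simp [PySem.Dict.getD_insert, hc]


lemma pvIdxIns_nodup (cs : List String) (t : List String)
    (d : PySem.Dict String (PySem.Set (List String)))
    (h : ∀ c', (d.getD c' PySem.Set.empty).Nodup) (c' : String) :
    ((pvIdxIns t d cs).getD c' PySem.Set.empty).Nodup := by
  induction cs generalizing d with
  | nil => exact h c'
  | cons c cs ih =>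
    simp only [pvIdxIns, List.foldl_cons] at *
    apply ih
    intro c''
    rw [PySem.Dict.getD_insert]
    split
    · exact PySem.Set.nodup_add _ _ (h c)
    · exact h c''


lemma pvIdx_mem (ws : List String) (d : PySem.Dict String (PySem.Set (List String)))
    (c' : String) (xt : List String) :
    xt ∈ (pvIdx ws d).getD c' PySem.Set.empty ↔
      xt ∈ d.getD c' PySem.Set.empty ∨
        ∃ w ∈ ws, xt = pyTuple w ∧ c' ∈ PySem.Set.ofList (pyTuple w) := by
  induction ws generalizing d with
  | nil => simp [pvIdx]
  | cons w ws ih =>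
    simp only [pvIdx, List.foldl_cons] at *
    rw [ih, pvIdxIns_mem]
    simp only [List.mem_cons]
    constructor
    · rintro ((h1 | ⟨hc, rfl⟩) | ⟨w', hw', rfl, hc⟩)
      · exact Or.inl h1
      · exact Or.inr ⟨w, Or.inl rfl, rfl, hc⟩
      · exact Or.inr ⟨w', Or.inr hw', rfl, hc⟩
    · rintro (h1 | ⟨w', (rfl | hw'), rfl, hc⟩)
      · exact Or.inl (Or.inl h1)
      · exact Or.inl (Or.inr ⟨hc, rfl⟩)
      · exact Or.inr ⟨w', hw', rfl, hc⟩


lemma pvIdx_nodup (ws : List String) (d : PySem.Dict String (PySem.Set (List String)))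
    (h : ∀ c', (d.getD c' PySem.Set.empty).Nodup) (c' : String) :
    ((pvIdx ws d).getD c' PySem.Set.empty).Nodup := by
  induction ws generalizing d with
  | nil => exact h c'
  | cons w ws ih =>
    simp only [pvIdx, List.foldl_cons] at *
    exact ih _ (fun c'' => pvIdxIns_nodup _ _ _ h c'')


lemma pvIdx_count (ws : List String) (x : String) (hx : x ∈ ws) (c : String) :
    ((pvIdx ws PySem.Dict.empty).getD c PySem.Set.empty).count (pyTuple x)
      = if c ∈ PySem.Set.ofList (pyTuple x) then 1 else 0 := by
  have hnd := pvIdx_nodup ws PySem.Dict.empty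
    (fun c' => by simp [PySem.Dict.getD_empty, PySem.Set.empty]) c
  by_cases hm : c ∈ PySem.Set.ofList (pyTuple x)
  · have hmem : pyTuple x ∈ (pvIdx ws PySem.Dict.empty).getD c PySem.Set.empty :=
      (pvIdx_mem ws PySem.Dict.empty c (pyTuple x)).mpr (Or.inr ⟨x, hx, rfl, hm⟩)
    simp only [hm, if_pos]
    exact List.count_eq_one_of_mem hnd hmem
  · have hmem : pyTuple x ∉ (pvIdx ws PySem.Dict.empty).getD c PySem.Set.empty := by
      rw [pvIdx_mem]
      rintro (h1 | ⟨w', hw', heq, hc⟩)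
      · simp [PySem.Dict.getD_empty, PySem.Set.empty] at h1
      · rw [pvTuple_inj heq] at hm
        exact hm hc
    simp only [hm, if_false]
    exact List.count_eq_zero.mpr hmem


lemma pvCounts (idx : PySem.Dict String (PySem.Set (List String))) (cs : List String)
    (d : PySem.Dict (List String) Int) (v : List String) :
    (cs.foldl (fun cnts c =>
        (idx.getD c PySem.Set.empty).foldl
          (fun cnts xt => cnts.insert xt (cnts.getD xt 0 + 1)) cnts) d).getD v 0
      = d.getD v 0 + ((cs.map (fun c => (((idx.getD c PySem.Set.empty).count v : Nat) : Int))).sum) := by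
  induction cs generalizing d with
  | nil => simp
  | cons c cs ih =>
    simp only [List.foldl_cons, List.map_cons, List.sum_cons]
    rw [ih, PySem.Dict.getD_foldl_insert_add_one]
    ring


lemma pvCond (ws : List String) (w x : String) (hx : x ∈ ws) :
    ((PySem.Set.ofList (pyTuple w)).foldl (fun cnts c =>
        ((pvIdx ws PySem.Dict.empty).getD c PySem.Set.empty).foldl
          (fun cnts xt => cnts.insert xt (cnts.getD xt 0 + 1)) cnts)
        (PySem.Dict.empty : PySem.Dict (List String) Int)).getD (pyTuple x) 0
      = ((PySem.Set.inter (PySem.Set.ofList (pyTuple w)) (PySem.Set.ofList (pyTuple x))).length : Int) := by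
  rw [pvCounts]
  rw [PySem.Dict.getD_empty, zero_add]
  have hfun : (fun c => (((((pvIdx ws PySem.Dict.empty).getD c PySem.Set.empty).count (pyTuple x) : Nat)) : Int))
      = fun c => if (decide (c ∈ PySem.Set.ofList (pyTuple x))) = true then (1:Int) else 0 := by
    funext c
    rw [pvIdx_count ws x hx c]
    by_cases hm : c ∈ PySem.Set.ofList (pyTuple x) <;> simp [hm]
  rw [hfun, PySem.List.sum_map_ite_one_zero]
  congr 1
  have hinter : PySem.Set.inter (PySem.Set.ofList (pyTuple w)) (PySem.Set.ofList (pyTuple x))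
      = (PySem.Set.ofList (pyTuple w)).filter
          (fun c => PySem.Set.contains (PySem.Set.ofList (pyTuple x)) c) := rfl
  rw [hinter, ← List.countP_eq_length_filter]
  exact List.countP_congr (fun c _ => by simp)


lemma pvMain (posswords : List String) :
    getIntersects posswords = getIntersects_alt posswords := by
  unfold getIntersects getIntersects_alt
  rw [pvPass1]
  simp only [List.nil_append]
  apply congrArg PySem.Dict.items
  rw [List.foldl_map]
  apply PySem.List.foldl_congr_mem
  intro inters w hw
  simp only [pvWordPair]
  congr 1
  rw [List.foldl_map]
  apply PySem.List.foldl_congr_mem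
  intro inter x hxmem
  simp only [pvWordPair]
  rw [pvCond posswords w x hxmem]
  simp [PySem.Set.len]


-- ===== VERDICT (by name: the statement is the Claim_ definition above) =====
theorem getIntersects_spec : Claim_equal_getIntersects := by
  intro posswords _
  unfold Spec_getIntersects
  exact pvMain posswords
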